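-- pv_equiv track=rewrite | github.com/AIlhomov/Kattis | drinkmenu.py | solve
-- ===== SOURCE A (Python) =====
-- def solve(drink_list, customer_orders):
--     customer_pos = {}
--     res = []
--
--     for customer in customer_orders:
--         if customer not in customer_pos:
--             customer_pos[customer] = 0
--
--         curr_pos = customer_pos[customer]
--         res.append(drink_list[curr_pos])
--         customer_pos[customer] += 1
--
--     return res
-- ===== SOURCE B (Python) =====
-- def solve(drink_list, customer_orders):
--     # Group-then-scatter: one full pass PER DISTINCT CUSTOMER.
--     # Allocate the result up front, then for each customer (in first-occurrence
--     # order) sweep the order list and fill that customer's slots with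
--     # drink_list[0], drink_list[1], ... in order.
--     res = [None] * len(customer_orders)
--     for c in dict.fromkeys(customer_orders):
--         k = 0
--         for i, x in enumerate(customer_orders):
--             if x == c:
--                 res[i] = drink_list[k]
--                 k += 1
--     return res
-- ===== Notes on version B (the rewrite author's own statement) =====
-- stated objective: alternative
-- what changed: Replaces A's single interleaved pass with a running per-customer counter dict by a group-then-scatter scheme: preallocate the result, then for each distinct customer make a separate sweep over the orders filling only that customer's slots with successive drinks.
-- outside the precondition, e.g. on solve(['a'], ['x', 'x']): A raises IndexError, B raises IndexError
import Mathlib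
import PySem

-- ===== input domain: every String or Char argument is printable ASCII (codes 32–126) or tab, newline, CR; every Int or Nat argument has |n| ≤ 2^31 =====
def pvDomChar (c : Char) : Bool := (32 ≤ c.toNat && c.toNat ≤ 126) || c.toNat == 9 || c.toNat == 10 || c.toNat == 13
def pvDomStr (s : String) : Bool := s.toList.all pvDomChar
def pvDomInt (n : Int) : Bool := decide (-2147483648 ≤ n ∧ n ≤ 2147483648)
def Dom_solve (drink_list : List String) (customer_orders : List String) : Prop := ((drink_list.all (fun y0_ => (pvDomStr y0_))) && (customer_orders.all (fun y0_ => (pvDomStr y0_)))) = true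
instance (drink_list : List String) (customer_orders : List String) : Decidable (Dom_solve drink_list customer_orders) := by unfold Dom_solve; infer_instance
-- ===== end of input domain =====

-- B replaces A's single interleaved counter-dict pass by group-then-scatter: preallocate
-- the result, then one sweep per distinct customer filling only that customer's slots.

-- ===== PORT A =====
-- running counter dict; drink_list[curr] is pyGet?; .getD "" only pads where Python would
-- raise IndexError, which Pre_solve excludes
def solve (drink_list : List String) (customer_orders : List String) : List String :=
  (customer_orders.foldl
    (fun (st : PySem.Dict String Int × List String) customer =>
      let cp := if (st.1.get? customer) = none then st.1.insert customer 0 else st.1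
      let curr := cp.getD customer 0
      (cp.insert customer (curr + 1),
       st.2 ++ [(PySem.List.pyGet? drink_list curr).getD ""]))
    (PySem.Dict.empty, [])).2

-- ===== PORT B =====
-- res = [None]*n is a List (Option String); dict.fromkeys is PySem.List.dedup;
-- res[i] = drink_list[k] is pySetD (index i from enumerate is always in range) of
-- (pyGet? drink_list k).getD "" — the .getD "" only pads where Python would raise
-- IndexError, which Pre_solve excludes; the final .map (·.getD "") reads the filled
-- Option cells back as the List String the signature requires.
def solve_alt (drink_list : List String) (customer_orders : List String) : List String :=
  let res0 : List (Option String) := List.replicate customer_orders.length none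
  let res := (PySem.List.dedup customer_orders).foldl
    (fun r c =>
      ((PySem.List.enumerate customer_orders 0).foldl
        (fun (st : List (Option String) × Int) p =>
          if p.2 == c then
            (PySem.List.pySetD st.1 p.1 (some ((PySem.List.pyGet? drink_list st.2).getD "")),
             st.2 + 1)
          else st)
        (r, 0)).1) res0
  res.map (fun o => o.getD "")

-- ===== PRECONDITION & SPEC =====
-- Pre_ excludes exactly the inputs where Python A (and B) raise IndexError: some
-- customer orders more drinks than drink_list has entries.
def Pre_solve (drink_list : List String) (customer_orders : List String) : Prop :=
  ∀ c ∈ customer_orders, customer_orders.count c ≤ drink_list.length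
instance (drink_list : List String) (customer_orders : List String) : Decidable (Pre_solve drink_list customer_orders) := by unfold Pre_solve; infer_instance
def pvWitness_solve : List String × List String := (["a", "b"], ["x", "y", "x"])

def Spec_solve (drink_list : List String) (customer_orders : List String) (out : List String) : Prop := out = solve_alt drink_list customer_orders
instance (drink_list : List String) (customer_orders : List String) (out : List String) : Decidable (Spec_solve drink_list customer_orders out) := by unfold Spec_solve; infer_instance

-- ===== CLAIM (what is proved, stated in full; the proofs are below) =====
def Claim_equal_solve : Prop := ∀ (drink_list : List String) (customer_orders : List String), Dom_solve drink_list customer_orders → Pre_solve drink_list customer_orders → Spec_solve drink_list customer_orders (solve drink_list customer_orders)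

-- ===== LEMMAS AND PROOFS =====

-- reference: element for customer c after prefix p is drink_list[p.count c]
def pvRef (drink_list : List String) : List String → List String → List String
  | _, [] => []
  | p, c :: t =>
      (PySem.List.pyGet? drink_list ((p.count c : Int))).getD "" :: pvRef drink_list (p ++ [c]) t

lemma pvLoopA (drink_list : List String) :
    ∀ (l p : List String) (d : PySem.Dict String Int) (acc : List String),
      (∀ c, d.getD c 0 = (p.count c : Int)) →
      (l.foldl
        (fun (st : PySem.Dict String Int × List String) customer =>
          let cp := if (st.1.get? customer) = none then st.1.insert customer 0 else st.1
          let curr := cp.getD customer 0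
          (cp.insert customer (curr + 1),
           st.2 ++ [(PySem.List.pyGet? drink_list curr).getD ""]))
        (d, acc)).2 = acc ++ pvRef drink_list p l := by
  intro l
  induction l with
  | nil => intro p d acc _; simp [pvRef]
  | cons c t ih =>
    intro p d acc hinv
    have hcp : ∀ cp, (cp = if d.get? c = none then d.insert c 0 else d) →
        cp.getD c 0 = (p.count c : Int) ∧ ∀ c', (cp.insert c (cp.getD c 0 + 1)).getD c' 0 = ((p ++ [c]).count c' : Int) := by
      intro cp hcpdef
      have hc : cp.getD c 0 = (p.count c : Int) := by
        by_cases h : d.get? c = none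
        · rw [hcpdef, if_pos h, PySem.Dict.getD_insert_self]
          rw [← hinv c, PySem.Dict.getD_of_get?_eq_none _ _ h]
        · rw [hcpdef, if_neg h]; exact hinv c
      refine ⟨hc, fun c' => ?_⟩
      rw [PySem.Dict.getD_insert]
      by_cases hcc : c' = c
      · subst hcc
        simp [hc, List.count_append]
      · rw [if_neg hcc]
        have : cp.getD c' 0 = (p.count c' : Int) := by
          by_cases h : d.get? c = none
          · rw [hcpdef, if_pos h, PySem.Dict.getD_insert_of_ne _ _ _ hcc]; exact hinv c'
          · rw [hcpdef, if_neg h]; exact hinv c'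
        rw [this]
        simp [List.count_append, Ne.symm hcc]
    simp only [List.foldl_cons]
    have h := hcp _ rfl
    rw [ih (p ++ [c]) _ _ h.2]
    simp [pvRef, h.1, List.append_assoc]

-- elementwise value of pvRef
lemma pvRef_length (drink_list : List String) :
    ∀ (l p : List String), (pvRef drink_list p l).length = l.length := by
  intro l
  induction l with
  | nil => intro p; simp [pvRef]
  | cons c t ih => intro p; simp [pvRef, ih]

lemma pvRef_get (drink_list : List String) :
    ∀ (l p : List String) (j : Nat) (hj : j < l.length),
      (pvRef drink_list p l)[j]'(by rw [pvRef_length]; exact hj) =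
        (PySem.List.pyGet? drink_list (((p ++ l.take j).count (l[j]'hj) : Int))).getD "" := by
  intro l
  induction l with
  | nil => intro p j hj; simp at hj
  | cons c t ih =>
    intro p j hj
    cases j with
    | zero => simp [pvRef]
    | succ j' =>
      have hj' : j' < t.length := by simpa using hj
      simpa [pvRef, List.append_assoc] using ih (p ++ [c]) j' hj'

-- B inner sweep: one pass for customer c fills exactly c's slots past position n
lemma pvInner (drink_list : List String) (c : String) :
    ∀ (l : List String) (n : Nat) (k : Int) (r : List (Option String)),
      r.length = n + l.length →
      ∀ (i : Nat), i < r.length →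
        (((PySem.List.enumerate l (n : Int)).foldl
          (fun (st : List (Option String) × Int) p =>
            if p.2 == c then
              (PySem.List.pySetD st.1 p.1 (some ((PySem.List.pyGet? drink_list st.2).getD "")),
               st.2 + 1)
            else st)
          (r, k)).1)[i]? =
        if n ≤ i ∧ l[i - n]? = some c then
          some (some ((PySem.List.pyGet? drink_list (k + ((l.take (i - n)).count c : Int))).getD ""))
        else r[i]? := by
  intro l
  induction l with
  | nil =>
    intro n k r hlen i hi
    rw [PySem.List.enumerate_nil]
    simp only [List.foldl_nil]
    have : ¬ (n ≤ i ∧ ([] : List String)[i - n]? = some c) := by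
      rintro ⟨_, h⟩; simp at h
    rw [if_neg this]
  | cons x t ih =>
    intro n k r hlen i hi
    have hlen1 : r.length = n + t.length + 1 := by simp at hlen; omega
    rw [PySem.List.enumerate_cons]
    simp only [List.foldl_cons]
    rw [show ((n : Int) + 1) = ((n + 1 : Nat) : Int) by push_cast; ring]
    by_cases hx : x = c
    · rw [if_pos (by simpa using hx)]
      have hr' : (PySem.List.pySetD r (n : Int)
          (some ((PySem.List.pyGet? drink_list k).getD ""))).length = (n + 1) + t.length := by
        rw [PySem.List.length_pySetD]; omega
      rw [ih (n + 1) (k + 1) _ hr' i (by rw [hr']; omega)]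
      have hset : ∀ (j : Nat), (PySem.List.pySetD r (n : Int)
          (some ((PySem.List.pyGet? drink_list k).getD "")))[j]? =
          if j = n then some (some ((PySem.List.pyGet? drink_list k).getD "")) else r[j]? := by
        intro j
        rw [PySem.List.pySetD_natCast]
        by_cases hjn : j = n
        · rw [if_pos hjn, hjn, List.getElem?_set_self (by omega)]
        · rw [if_neg hjn, List.getElem?_set_ne (fun h => hjn h.symm)]
      by_cases h1 : n + 1 ≤ i ∧ t[i - (n + 1)]? = some c
      · rw [if_pos h1]
        have h2 : n ≤ i ∧ (x :: t)[i - n]? = some c := by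
          refine ⟨by omega, ?_⟩
          have : i - n = (i - (n + 1)) + 1 := by omega
          rw [this]; simpa using h1.2
        rw [if_pos h2]
        have htake : (x :: t).take (i - n) = x :: t.take (i - (n + 1)) := by
          have : i - n = (i - (n + 1)) + 1 := by omega
          rw [this, List.take_succ_cons]
        rw [htake]
        subst hx
        simp only [List.count_cons, beq_self_eq_true, if_true]
        push_cast
        ring_nf
      · rw [if_neg h1, hset]
        by_cases hin : i = n
        · have h2 : n ≤ i ∧ (x :: t)[i - n]? = some c := by
            refine ⟨by omega, ?_⟩
            have h0 : i - n = 0 := by omega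
            rw [h0]; simp [hx]
          rw [if_pos h2, if_pos hin]
          have h0 : i - n = 0 := by omega
          rw [h0]
          simp
        · rw [if_neg hin]
          have h2 : ¬ (n ≤ i ∧ (x :: t)[i - n]? = some c) := by
            rintro ⟨hni, hg⟩
            rcases Nat.lt_or_ge n i with hlt | hge
            · apply h1
              refine ⟨by omega, ?_⟩
              have : i - n = (i - (n + 1)) + 1 := by omega
              rw [this] at hg; simpa using hg
            · exact hin (by omega)
          rw [if_neg h2]
    · rw [if_neg (by simpa using hx)]
      rw [ih (n + 1) k r (by omega) i (by omega)]
      by_cases h1 : n + 1 ≤ i ∧ t[i - (n + 1)]? = some c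
      · rw [if_pos h1]
        have h2 : n ≤ i ∧ (x :: t)[i - n]? = some c := by
          refine ⟨by omega, ?_⟩
          have : i - n = (i - (n + 1)) + 1 := by omega
          rw [this]; simpa using h1.2
        rw [if_pos h2]
        have htake : (x :: t).take (i - n) = x :: t.take (i - (n + 1)) := by
          have : i - n = (i - (n + 1)) + 1 := by omega
          rw [this, List.take_succ_cons]
        rw [htake]
        simp [hx]
      · rw [if_neg h1]
        by_cases hin : i = n
        · rw [if_neg (by
            rintro ⟨_, hg⟩
            have h0 : i - n = 0 := by omega
            rw [h0] at hg
            simp [hx] at hg)]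
        · have h2 : ¬ (n ≤ i ∧ (x :: t)[i - n]? = some c) := by
            rintro ⟨hni, hg⟩
            rcases Nat.lt_or_ge n i with hlt | hge
            · apply h1
              refine ⟨by omega, ?_⟩
              have : i - n = (i - (n + 1)) + 1 := by omega
              rw [this] at hg; simpa using hg
            · exact hin (by omega)
          rw [if_neg h2]

-- one full sweep (n = 0) over customer_orders, as folded by solve_alt's outer loop
def pvSweep (drink_list customer_orders : List String) (r : List (Option String)) (c : String) :
    List (Option String) :=
  ((PySem.List.enumerate customer_orders 0).foldl
    (fun (st : List (Option String) × Int) p =>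
      if p.2 == c then
        (PySem.List.pySetD st.1 p.1 (some ((PySem.List.pyGet? drink_list st.2).getD "")),
         st.2 + 1)
      else st)
    (r, 0)).1

lemma pvSweep_length_aux (drink_list : List String) (c : String) :
    ∀ (ps : List (Int × String)) (r : List (Option String)) (k : Int),
      ((ps.foldl
        (fun (st : List (Option String) × Int) p =>
          if p.2 == c then
            (PySem.List.pySetD st.1 p.1 (some ((PySem.List.pyGet? drink_list st.2).getD "")),
             st.2 + 1)
          else st)
        (r, k)).1).length = r.length := by
  intro ps
  induction ps with
  | nil => intro r k; rfl
  | cons p t ih =>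
    intro r k
    simp only [List.foldl_cons]
    by_cases h : p.2 == c
    · rw [if_pos h, ih]
      exact PySem.List.length_pySetD _ _ _
    · rw [if_neg h, ih]

lemma pvSweep_length (drink_list customer_orders : List String)
    (r : List (Option String)) (c : String) :
    (pvSweep drink_list customer_orders r c).length = r.length :=
  pvSweep_length_aux drink_list c _ r 0

-- outer fold over the distinct customers
lemma pvOuter (drink_list customer_orders : List String) :
    ∀ (cs : List String) (r : List (Option String)),
      r.length = customer_orders.length →
      ∀ (i : Nat) (hi : i < customer_orders.length),
        ((cs.foldl (pvSweep drink_list customer_orders) r))[i]? =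
        if customer_orders[i]'hi ∈ cs then
          some (some ((PySem.List.pyGet? drink_list
            (((customer_orders.take i).count (customer_orders[i]'hi) : Int))).getD ""))
        else r[i]? := by
  intro cs
  induction cs with
  | nil => intro r _ i hi; simp
  | cons c cs ih =>
    intro r hlen i hi
    simp only [List.foldl_cons]
    rw [ih _ (by rw [pvSweep_length]; exact hlen) i hi]
    have hsweep : (pvSweep drink_list customer_orders r c)[i]? =
        if 0 ≤ i ∧ customer_orders[i - 0]? = some c then
          some (some ((PySem.List.pyGet? drink_list
            ((0 : Int) + ((customer_orders.take (i - 0)).count c : Int))).getD ""))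
        else r[i]? :=
      pvInner drink_list c customer_orders 0 0 r (by omega) i (by omega)
    by_cases hmem : customer_orders[i]'hi ∈ cs
    · rw [if_pos hmem, if_pos (by simp [hmem])]
    · rw [if_neg hmem, hsweep]
      by_cases hc : customer_orders[i]'hi = c
      · rw [if_pos (by simp [List.getElem?_eq_getElem hi, hc]),
            if_pos (by simp [hc])]
        rw [← hc]
        norm_num
      · rw [if_neg (by
            rintro ⟨_, hg⟩
            rw [Nat.sub_zero, List.getElem?_eq_getElem hi] at hg
            exact hc (by simpa using hg)),
          if_neg (by simp [hc, hmem])]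

lemma pvFold_length (drink_list customer_orders : List String) :
    ∀ (cs : List String) (r : List (Option String)),
      (cs.foldl (pvSweep drink_list customer_orders) r).length = r.length := by
  intro cs
  induction cs with
  | nil => intro r; rfl
  | cons c cs ih => intro r; rw [List.foldl_cons, ih, pvSweep_length]

-- ===== VERDICT (by name: the statement is the Claim_ definition above) =====
theorem solve_spec : Claim_equal_solve := by
  intro drink_list customer_orders _ _
  show solve drink_list customer_orders = solve_alt drink_list customer_orders
  unfold solve solve_alt
  rw [pvLoopA drink_list customer_orders [] PySem.Dict.empty []
        (by intro c; simp [PySem.Dict.getD_empty])]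
  simp only [List.nil_append]
  change pvRef drink_list [] customer_orders =
    ((PySem.List.dedup customer_orders).foldl (pvSweep drink_list customer_orders)
      (List.replicate customer_orders.length none)).map (fun o => o.getD "")
  apply List.ext_getElem
  · rw [pvRef_length, List.length_map, pvFold_length, List.length_replicate]
  · intro i hi1 hi2
    have hi : i < customer_orders.length := by rwa [pvRef_length] at hi1
    rw [pvRef_get drink_list customer_orders [] i hi]
    have hres := pvOuter drink_list customer_orders (PySem.List.dedup customer_orders)
      (List.replicate customer_orders.length none) (by simp) i hi
    rw [if_pos (by rw [PySem.List.mem_dedup]; exact List.getElem_mem hi)] at hres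
    have : (((PySem.List.dedup customer_orders).foldl (pvSweep drink_list customer_orders)
        (List.replicate customer_orders.length none)).map (fun o => o.getD ""))[i]? =
        some ((PySem.List.pyGet? drink_list
          (((customer_orders.take i).count (customer_orders[i]'hi) : Int))).getD "") := by
      rw [List.getElem?_map, hres]
      rfl
    rw [List.getElem?_eq_getElem hi2] at this
    simp only [List.nil_append]
    exact (Option.some.inj this).symm
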